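-- pv_equiv track=rewrite | github.com/jfish2/Py-Algorithms | sliding_window.py | brute_highest_sum
-- ===== SOURCE A (Python) =====
-- def brute_highest_sum(arr, k):
--     highest_sum = float('-inf')
--     n = len(arr)
--
--     # n can't be smaller than k
--     if n < k:
--         return -1
--
--     # subarray starts at i
--     for i in range(n - k + 1):
--         # calculate sum of subarray
--         current_sum = 0
--         for j in range(k):
--             current_sum += arr[i + j]
--         # compare sum
--         highest_sum = max(highest_sum, current_sum)
--     return highest_sum
-- ===== SOURCE B (Python) =====
-- def brute_highest_sum(arr, k):
--     n = len(arr)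
--     if n < k:
--         return -1
--     if k <= 0:
--         # every window is empty, so every window sum is 0
--         return 0
--     window = sum(arr[:k])
--     best = window
--     for i in range(k, n):
--         window += arr[i] - arr[i - k]
--         if window > best:
--             best = window
--     return best
-- ===== Notes on version B (the rewrite author's own statement) =====
-- stated objective: faster
-- what changed: Replaces the nested loop (recomputing each k-window sum from scratch) with a single-pass sliding window that updates a running sum by adding the entering element and subtracting the leaving one.
import Mathlib
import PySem

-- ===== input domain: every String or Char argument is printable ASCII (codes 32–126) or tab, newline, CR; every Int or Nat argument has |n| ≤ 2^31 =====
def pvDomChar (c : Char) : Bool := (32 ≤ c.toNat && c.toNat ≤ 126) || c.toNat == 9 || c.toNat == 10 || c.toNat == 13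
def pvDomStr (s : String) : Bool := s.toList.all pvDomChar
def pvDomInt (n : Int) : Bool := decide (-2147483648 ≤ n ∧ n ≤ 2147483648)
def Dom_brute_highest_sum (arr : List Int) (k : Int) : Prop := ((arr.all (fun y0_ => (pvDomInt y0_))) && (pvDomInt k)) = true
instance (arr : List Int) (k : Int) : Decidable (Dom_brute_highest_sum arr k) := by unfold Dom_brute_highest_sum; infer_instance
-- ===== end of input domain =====

-- B replaces A's nested O(n*k) re-summation of every window by a one-pass O(n) sliding window (objective: faster).

-- ===== PORT A =====
-- 'highest_sum = float(-inf)' is modelled as 'none'; it is never the returned value when n ≥ k.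
def brute_highest_sum (arr : List Int) (k : Int) : Int :=
  let n : Int := arr.length
  if n < k then -1
  else
    ((PySem.List.pyRange 0 (n - k + 1) 1).foldl
      (fun (hs : Option Int) (i : Int) =>
        let cur : Int :=
          (PySem.List.pyRange 0 k 1).foldl (fun c j => c + PySem.List.pyGetD arr (i + j) 0) 0
        match hs with
        | none => some cur
        | some v => some (max v cur))
      (none : Option Int)).getD 0

-- ===== PORT B =====
def brute_highest_sum_alt (arr : List Int) (k : Int) : Int :=
  let n : Int := arr.length
  if n < k then -1
  else if k ≤ 0 then 0
  else
    let w0 : Int := (PySem.List.slice arr none (some k)).sum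
    let r :=
      (PySem.List.pyRange k n 1).foldl
        (fun (s : Int × Int) (i : Int) =>
          let w := s.1 + PySem.List.pyGetD arr i 0 - PySem.List.pyGetD arr (i - k) 0
          (w, if w > s.2 then w else s.2))
        (w0, w0)
    r.2

-- ===== PRECONDITION & SPEC =====
def Spec_brute_highest_sum (arr : List Int) (k : Int) (out : Int) : Prop := out = brute_highest_sum_alt arr k
instance (arr : List Int) (k : Int) (out : Int) : Decidable (Spec_brute_highest_sum arr k out) := by unfold Spec_brute_highest_sum; infer_instance

-- ===== CLAIM (what is proved, stated in full; the proofs are below) =====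
def Claim_equal_brute_highest_sum : Prop := ∀ (arr : List Int) (k : Int), Dom_brute_highest_sum arr k → Spec_brute_highest_sum arr k (brute_highest_sum arr k)

-- ===== LEMMAS AND PROOFS =====

-- window sum starting at j, of width K
def pvWs (arr : List Int) (K j : Nat) : Int := ((arr.drop j).take K).sum

-- running best over windows 0..t
def pvBmax (arr : List Int) (K : Nat) : Nat → Int
  | 0 => pvWs arr K 0
  | t+1 => if pvWs arr K (t+1) > pvBmax arr K t then pvWs arr K (t+1) else pvBmax arr K t

-- A's inner loop equals the window sum
theorem pv_innerA (arr : List Int) (a t : Nat) (h : a + t ≤ arr.length) :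
    (PySem.List.pyRange 0 (t : Int) 1).foldl
      (fun c j => c + PySem.List.pyGetD arr ((a : Int) + j) 0) 0
    = pvWs arr t a := by
  induction t with
  | zero => simp [PySem.List.pyRange_one_eq_nil, pvWs]
  | succ m ih =>
    have hm : a + m ≤ arr.length := by omega
    have hstep : (PySem.List.pyRange 0 ((m : Int) + 1) 1)
        = PySem.List.pyRange 0 (m : Int) 1 ++ [(m : Int)] :=
      PySem.List.pyRange_one_succ_right (by omega)
    have hcast : ((m + 1 : Nat) : Int) = (m : Int) + 1 := by push_cast; ring
    rw [hcast, hstep, List.foldl_append, ih hm]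
    have hlt : a + m < arr.length := by omega
    have hg : PySem.List.pyGetD arr ((a : Int) + (m : Int)) 0 = arr[a + m] := by
      have : ((a : Int) + (m : Int)) = ((a + m : Nat) : Int) := by push_cast; ring
      rw [this, PySem.List.pyGetD_natCast, List.getD_eq_getElem _ _ hlt]
    have hdl : m < (arr.drop a).length := by simp; omega
    have hge : (arr.drop a)[m] = arr[a + m] := List.getElem_drop
    simp only [List.foldl_cons, List.foldl_nil, hg, pvWs,
      List.sum_take_succ _ m hdl, hge]

-- sliding-window update, stated with getD to keep indices proof-free
theorem pv_slide (arr : List Int) (K j : Nat) (hK : 1 ≤ K) (h : K + j < arr.length) :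
    pvWs arr K (j+1) = pvWs arr K j + arr.getD (K + j) 0 - arr.getD j 0 := by
  obtain ⟨m, rfl⟩ : ∃ m, K = m + 1 := ⟨K - 1, by omega⟩
  have hj : j < arr.length := by omega
  have hd : arr.drop j = arr[j] :: arr.drop (j+1) := List.drop_eq_getElem_cons hj
  have hm : m < (arr.drop (j+1)).length := by simp; omega
  have hlt : m + 1 + j < arr.length := h
  have hge : (arr.drop (j+1))[m] = arr[j + 1 + m] := List.getElem_drop
  have h1 : arr.getD (m + 1 + j) 0 = arr[j + 1 + m] := by
    rw [List.getD_eq_getElem _ _ hlt]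
    congr 1
    omega
  have h2 : arr.getD j 0 = arr[j] := List.getD_eq_getElem _ _ hj
  unfold pvWs
  rw [hd, List.take_succ_cons, List.sum_cons, List.sum_take_succ _ m hm, hge, h1, h2]
  ring

-- B's loop computes (pvWs t, pvBmax t)
theorem pv_Bloop (arr : List Int) (K : Nat) (t : Nat) (hK : 1 ≤ K) (h : K + t ≤ arr.length) :
    (PySem.List.pyRange (K : Int) ((K : Int) + (t : Int)) 1).foldl
      (fun (s : Int × Int) (i : Int) =>
        let w := s.1 + PySem.List.pyGetD arr i 0 - PySem.List.pyGetD arr (i - (K : Int)) 0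
        (w, if w > s.2 then w else s.2))
      (pvWs arr K 0, pvWs arr K 0)
    = (pvWs arr K t, pvBmax arr K t) := by
  induction t with
  | zero => simp [PySem.List.pyRange_one_eq_nil, pvBmax]
  | succ m ih =>
    have hm : K + m ≤ arr.length := by omega
    have hcast : (K : Int) + ((m + 1 : Nat) : Int) = ((K : Int) + (m : Int)) + 1 := by
      push_cast; ring
    have hstep : PySem.List.pyRange (K : Int) (((K : Int) + (m : Int)) + 1) 1
        = PySem.List.pyRange (K : Int) ((K : Int) + (m : Int)) 1 ++ [(K : Int) + (m : Int)] :=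
      PySem.List.pyRange_one_succ_right (by omega)
    rw [hcast, hstep, List.foldl_append, ih hm]
    have hlt : K + m < arr.length := by omega
    have hmlt : m < arr.length := by omega
    have hg1 : PySem.List.pyGetD arr ((K : Int) + (m : Int)) 0 = arr.getD (K + m) 0 := by
      have : ((K : Int) + (m : Int)) = ((K + m : Nat) : Int) := by push_cast; ring
      rw [this, PySem.List.pyGetD_natCast]
    have hg2 : PySem.List.pyGetD arr (((K : Int) + (m : Int)) - (K : Int)) 0
        = arr.getD m 0 := by
      have : (((K : Int) + (m : Int)) - (K : Int)) = ((m : Nat) : Int) := by push_cast; ring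
      rw [this, PySem.List.pyGetD_natCast]
    have hw : pvWs arr K m + arr.getD (K + m) 0 - arr.getD m 0 = pvWs arr K (m+1) :=
      (pv_slide arr K m hK hlt).symm
    simp only [List.foldl_cons, List.foldl_nil, hg1, hg2, hw, pvBmax]

-- A's outer loop computes some (pvBmax t)
theorem pv_Aloop (arr : List Int) (K : Nat) (t : Nat) (h : K + t ≤ arr.length) :
    (PySem.List.pyRange 0 ((t : Int) + 1) 1).foldl
      (fun (hs : Option Int) (i : Int) =>
        let cur : Int :=
          (PySem.List.pyRange 0 (K : Int) 1).foldl
            (fun c j => c + PySem.List.pyGetD arr (i + j) 0) 0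
        match hs with
        | none => some cur
        | some v => some (max v cur))
      (none : Option Int)
    = some (pvBmax arr K t) := by
  induction t with
  | zero =>
    have h0 : PySem.List.pyRange 0 ((0 : Int) + 1) 1 = [(0 : Int)] := by
      rw [zero_add]; exact PySem.List.pyRange_one_singleton 0
    have hin := pv_innerA arr 0 K (by omega)
    simp only [Nat.cast_zero, h0, List.foldl_cons, List.foldl_nil]
    simp only [Nat.cast_zero, zero_add] at hin ⊢
    rw [hin]
    rfl
  | succ m ih =>
    have hm : K + m ≤ arr.length := by omega
    have hcast : ((m + 1 : Nat) : Int) + 1 = ((m : Int) + 1) + 1 := by push_cast; ring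
    have hstep : PySem.List.pyRange 0 (((m : Int) + 1) + 1) 1
        = PySem.List.pyRange 0 ((m : Int) + 1) 1 ++ [(m : Int) + 1] :=
      PySem.List.pyRange_one_succ_right (by omega)
    rw [hcast, hstep, List.foldl_append, ih hm]
    have hinner := pv_innerA arr (m+1) K (by omega)
    have hc : (((m+1 : Nat)) : Int) = (m : Int) + 1 := by omega
    rw [hc] at hinner
    simp only [List.foldl_cons, List.foldl_nil, hinner]
    have hmax : max (pvBmax arr K m) (pvWs arr K (m+1)) = pvBmax arr K (m+1) := by
      simp only [pvBmax]; omega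
    rw [hmax]

-- fold of A's outer step over a nonempty range when k ≤ 0 (every window sum is 0)
theorem pv_Azero (arr : List Int) (k : Int) (hk : k ≤ 0) (l : List Int) (hs : Option Int)
    (hhs : hs = none ∨ hs = some 0) (hne : hs = none → l ≠ []) :
    (l.foldl
      (fun (hs : Option Int) (i : Int) =>
        let cur : Int :=
          (PySem.List.pyRange 0 k 1).foldl (fun c j => c + PySem.List.pyGetD arr (i + j) 0) 0
        match hs with
        | none => some cur
        | some v => some (max v cur))
      hs) = some 0 := by
  induction l generalizing hs with
  | nil =>
    rcases hhs with h | h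
    · exact absurd rfl (hne h)
    · simp [h]
  | cons x xs ih =>
    rw [List.foldl_cons]
    have hx : (let cur : Int :=
          (PySem.List.pyRange 0 k 1).foldl (fun c j => c + PySem.List.pyGetD arr (x + j) 0) 0
        match hs with
        | none => some cur
        | some v => some (max v cur)) = some 0 := by
      rcases hhs with h | h <;> subst h <;> simp [PySem.List.pyRange_one_eq_nil hk]
    rw [hx]
    exact ih (some 0) (Or.inr rfl) (fun hc => by simp at hc)

-- ===== VERDICT (by name: the statement is the Claim_ definition above) =====
theorem brute_highest_sum_spec : Claim_equal_brute_highest_sum := by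
  intro arr k _
  unfold Spec_brute_highest_sum brute_highest_sum brute_highest_sum_alt
  simp only
  by_cases hlt : (arr.length : Int) < k
  · simp [hlt]
  · simp only [hlt, if_false]
    by_cases hk : k ≤ 0
    · simp only [hk, if_true]
      have hne : PySem.List.pyRange 0 ((arr.length : Int) - k + 1) 1 ≠ [] := by
        have : (0 : Int) < (arr.length : Int) - k + 1 := by omega
        rw [PySem.List.pyRange_one_cons this]; simp
      rw [pv_Azero arr k hk _ none (Or.inl rfl) (fun _ => hne)]
      rfl
    · simp only [hk, if_false]
      rw [not_le] at hk; rw [not_lt] at hlt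
      obtain ⟨K, rfl⟩ : ∃ K : Nat, k = (K : Int) := ⟨k.toNat, by omega⟩
      have hK1 : 1 ≤ K := by exact_mod_cast hk
      have hKN : K ≤ arr.length := by exact_mod_cast hlt
      obtain ⟨T, hT⟩ : ∃ T : Nat, arr.length = K + T := ⟨arr.length - K, by omega⟩
      have hw0 : (PySem.List.slice arr none (some (K : Int))).sum = pvWs arr K 0 := by
        rw [PySem.List.slice_to_natCast]; simp [pvWs]
      have hAr : ((arr.length : Int) - (K : Int) + 1) = ((T : Int) + 1) := by
        rw [hT]; push_cast; ring
      have hBr : (arr.length : Int) = (K : Int) + (T : Int) := by rw [hT]; push_cast; ring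
      rw [hAr, pv_Aloop arr K T (by omega), hw0, hBr,
        pv_Bloop arr K T hK1 (by omega)]
      rfl
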